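-- pv_equiv track=rewrite | github.com/Radiirgummii/songbook | songbook.py | render_verse
-- ===== SOURCE A (Python) =====
-- def render_verse(txt: str, renderchords: bool = True) -> str:
--     lines: list = txt.split("%")
--     splituplines: list[list[str]] = []
--     formatted: str = ""
--     for line in lines:
--         line = line.split("{")
--         splitupline: list[str] = []
--         for segment in line:
--             # if len splitupline[x] = 1 only text if len = 2 first chord then text segment
--             splitupline.append(segment.split("}"))
--         splituplines.append(splitupline)
--     for line in splituplines:
--         chordline: str = ""
--         textline: str = ""
--         for segment in line:
--             if len(segment) <= 1:
--                 textline += segment[0]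
--                 chordline += " " * len(segment[0])
--             else:
--                 chordline += segment[0] + " " * \
--                     (len(segment[1])-len(segment[0]))
--                 textline += segment[1]
--         if renderchords:
--             formatted += f"{chordline}\n{textline}\n"
--         else:
--             formatted += f"{textline} "
--     return formatted
-- ===== SOURCE B (Python) =====
-- def render_verse(txt: str, renderchords: bool = True) -> str:
--     # Single character-by-character scan: a small state machine replaces the
--     # three nested split() passes and the intermediate nested list.
--     out = []
--     chord = []
--     text = []
--     p0 = []  # chars before the first '}' of the current segment
--     p1 = []  # chars between the first and second '}'
--     state = 0  # 0: filling p0, 1: filling p1, 2: dropping extra chars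
--
--     def flush_segment():
--         nonlocal state
--         if state == 0:
--             text.extend(p0)
--             chord.extend(" " * len(p0))
--         else:
--             chord.extend(p0)
--             chord.extend(" " * (len(p1) - len(p0)))
--             text.extend(p1)
--         p0.clear()
--         p1.clear()
--         state = 0
--
--     def flush_line():
--         flush_segment()
--         if renderchords:
--             out.append("".join(chord))
--             out.append("\n")
--             out.append("".join(text))
--             out.append("\n")
--         else:
--             out.append("".join(text))
--             out.append(" ")
--         chord.clear()
--         text.clear()
--
--     for ch in txt:
--         if ch == "%":
--             flush_line()
--         elif ch == "{":
--             flush_segment()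
--         elif ch == "}":
--             if state < 2:
--                 state += 1
--         elif state == 0:
--             p0.append(ch)
--         elif state == 1:
--             p1.append(ch)
--     flush_line()
--     return "".join(out)
-- ===== Notes on version B (the rewrite author's own statement) =====
-- stated objective: alternative
-- what changed: Replaced A's three nested split() passes and the intermediate nested list-of-lists by a single character-by-character state-machine scan that builds the chord/text accumulators and the output directly.
import Mathlib
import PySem

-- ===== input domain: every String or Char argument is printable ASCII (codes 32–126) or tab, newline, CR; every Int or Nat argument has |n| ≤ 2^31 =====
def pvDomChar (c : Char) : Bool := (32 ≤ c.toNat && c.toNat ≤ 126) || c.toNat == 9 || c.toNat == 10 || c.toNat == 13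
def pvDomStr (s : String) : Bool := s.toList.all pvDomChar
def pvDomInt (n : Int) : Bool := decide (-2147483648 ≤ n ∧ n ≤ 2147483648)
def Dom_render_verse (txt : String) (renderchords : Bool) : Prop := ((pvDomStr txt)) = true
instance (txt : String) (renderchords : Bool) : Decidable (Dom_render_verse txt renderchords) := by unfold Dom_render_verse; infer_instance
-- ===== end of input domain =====

-- B replaces A's three nested split() passes and intermediate nested list by a single
-- character-by-character state-machine scan (objective: alternative single-pass decomposition).

-- ===== PORT A =====
def render_verse (txt : String) (renderchords : Bool) : String :=
  let lines : List (List Char) := PySem.Chars.splitOn txt.toList ['%']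
  let splituplines : List (List (List (List Char))) :=
    lines.foldl (fun acc line =>
      acc ++ [ (PySem.Chars.splitOn line ['{']).foldl
                 (fun sacc segment => sacc ++ [PySem.Chars.splitOn segment ['}']]) [] ]) []
  let formatted : List Char :=
    splituplines.foldl (fun formatted line =>
      let ct : List Char × List Char :=
        line.foldl (fun ct segment =>
          if segment.length ≤ 1 then
            (ct.1 ++ PySem.List.pyRepeat [' '] (((PySem.List.pyGetD segment 0 []).length : Int)),
             ct.2 ++ PySem.List.pyGetD segment 0 [])
          else
            (ct.1 ++ PySem.List.pyGetD segment 0 [] ++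
               PySem.List.pyRepeat [' ']
                 (((PySem.List.pyGetD segment 1 []).length : Int) -
                  ((PySem.List.pyGetD segment 0 []).length : Int)),
             ct.2 ++ PySem.List.pyGetD segment 1 [])) ([], [])
      if renderchords then formatted ++ ct.1 ++ ['\n'] ++ ct.2 ++ ['\n']
      else formatted ++ ct.2 ++ [' ']) []
  String.ofList formatted

-- ===== PORT B =====
structure BSt where
  out : List Char
  chord : List Char
  text : List Char
  p0 : List Char
  p1 : List Char
  st : Nat

def bFlushSeg (s : BSt) : BSt :=
  if s.st = 0 then
    { out := s.out, chord := s.chord ++ PySem.List.pyRepeat [' '] ((s.p0.length : Int)),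
      text := s.text ++ s.p0, p0 := [], p1 := [], st := 0 }
  else
    { out := s.out,
      chord := s.chord ++ s.p0 ++ PySem.List.pyRepeat [' '] (((s.p1.length : Int) - (s.p0.length : Int))),
      text := s.text ++ s.p1, p0 := [], p1 := [], st := 0 }

def bFlushLine (renderchords : Bool) (s : BSt) : BSt :=
  let s := bFlushSeg s
  { out := if renderchords then s.out ++ s.chord ++ ['\n'] ++ s.text ++ ['\n']
           else s.out ++ s.text ++ [' '],
    chord := [], text := [], p0 := [], p1 := [], st := 0 }

def bStep (renderchords : Bool) (s : BSt) (ch : Char) : BSt :=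
  if ch = '%' then bFlushLine renderchords s
  else if ch = '{' then bFlushSeg s
  else if ch = '}' then (if s.st < 2 then { s with st := s.st + 1 } else s)
  else if s.st = 0 then { s with p0 := s.p0 ++ [ch] }
  else if s.st = 1 then { s with p1 := s.p1 ++ [ch] }
  else s

def render_verse_alt (txt : String) (renderchords : Bool) : String :=
  String.ofList
    (bFlushLine renderchords
      (txt.toList.foldl (bStep renderchords) ⟨[], [], [], [], [], 0⟩)).out

-- ===== PRECONDITION & SPEC =====
def Spec_render_verse (txt : String) (renderchords : Bool) (out : String) : Prop := out = render_verse_alt txt renderchords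
instance (txt : String) (renderchords : Bool) (out : String) : Decidable (Spec_render_verse txt renderchords out) := by unfold Spec_render_verse; infer_instance

-- ===== CLAIM (what is proved, stated in full; the proofs are below) =====
def Claim_equal_render_verse : Prop := ∀ (txt : String) (renderchords : Bool), Dom_render_verse txt renderchords → Spec_render_verse txt renderchords (render_verse txt renderchords)

-- ===== LEMMAS AND PROOFS =====

-- structural single-character split (used as the common reference shape)
def charSplit (cs : List Char) (c : Char) : List (List Char) :=
  match cs with
  | [] => [[]]
  | x :: xs =>
    if x = c then [] :: charSplit xs c
    else
      match charSplit xs c with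
      | [] => [[x]]
      | h :: t => (x :: h) :: t

def modHead (f : List Char → List Char) : List (List Char) → List (List Char)
  | [] => []
  | h :: t => f h :: t

theorem charSplit_ne_nil (cs : List Char) (c : Char) : charSplit cs c ≠ [] := by
  cases cs with
  | nil => simp [charSplit]
  | cons x xs =>
    simp only [charSplit]
    split
    · simp
    · split <;> simp

theorem splitOn_go_eq (c : Char) (l : List Char) : ∀ (fuel : Nat) (cur : List Char)
    (acc : List (List Char)), l.length < fuel →
    PySem.Chars.splitOn.go [c] fuel l cur acc =
      acc.reverse ++ modHead (fun h => cur.reverse ++ h) (charSplit l c) := by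
  induction l with
  | nil =>
    intro fuel cur acc h
    match fuel with
    | fuel + 1 => simp [PySem.Chars.splitOn.go, charSplit, modHead]
  | cons x xs ih =>
    intro fuel cur acc h
    match fuel with
    | fuel + 1 =>
      rw [PySem.Chars.splitOn.go]
      by_cases hx : x = c
      · subst hx
        simp only [List.isPrefixOf, beq_self_eq_true, Bool.true_and, if_pos, charSplit]
        have hd : List.drop [x].length (x :: xs) = xs := rfl
        rw [hd]
        rw [ih fuel [] (cur.reverse :: acc) (by simpa using h)]
        obtain ⟨h', t', ht⟩ : ∃ h' t', charSplit xs x = h' :: t' := by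
          rcases hq : charSplit xs x with _ | ⟨h', t'⟩
          · exact absurd hq (charSplit_ne_nil xs x)
          · exact ⟨h', t', rfl⟩
        simp [ht, modHead]
      · have hpre : ([c].isPrefixOf (x :: xs)) = false := by
          simp [List.isPrefixOf]
          exact fun hc => absurd hc.symm hx
        rw [hpre]
        simp only [Bool.false_eq_true, if_false]
        rw [ih fuel (x :: cur) acc (by simpa using h)]
        obtain ⟨h', t', ht⟩ : ∃ h' t', charSplit xs c = h' :: t' := by
          rcases hq : charSplit xs c with _ | ⟨h', t'⟩
          · exact absurd hq (charSplit_ne_nil xs c)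
          · exact ⟨h', t', rfl⟩
        simp [charSplit, hx, ht, modHead]

theorem splitOn_eq_charSplit (cs : List Char) (c : Char) :
    PySem.Chars.splitOn cs [c] = charSplit cs c := by
  rw [PySem.Chars.splitOn, splitOn_go_eq c cs (cs.length + 1) [] [] (by omega)]
  obtain ⟨h', t', ht⟩ : ∃ h' t', charSplit cs c = h' :: t' := by
    rcases hq : charSplit cs c with _ | ⟨h', t'⟩
    · exact absurd hq (charSplit_ne_nil cs c)
    · exact ⟨h', t', rfl⟩
  simp [ht, modHead]

-- the three-field segment state (p0, p1, st) and its abstract operations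
def appendAt (a : List Char) (s : List Char × List Char × Nat) : List Char × List Char × Nat :=
  if s.2.2 = 0 then (s.1 ++ a, s.2.1, s.2.2)
  else if s.2.2 = 1 then (s.1, s.2.1 ++ a, s.2.2)
  else s

def bump (s : List Char × List Char × Nat) : List Char × List Char × Nat :=
  (s.1, s.2.1, if s.2.2 < 2 then s.2.2 + 1 else s.2.2)

def charStep (x : Char) (s : List Char × List Char × Nat) : List Char × List Char × Nat :=
  if x = '}' then bump s else appendAt [x] s

def applyParts : List (List Char) → (List Char × List Char × Nat) → List Char × List Char × Nat
  | [], s => s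
  | [a], s => appendAt a s
  | a :: b :: t, s => applyParts (b :: t) (bump (appendAt a s))

def emit (ct : List Char × List Char) (s : List Char × List Char × Nat) :
    List Char × List Char :=
  if s.2.2 = 0 then
    (ct.1 ++ PySem.List.pyRepeat [' '] ((s.1.length : Int)), ct.2 ++ s.1)
  else
    (ct.1 ++ s.1 ++ PySem.List.pyRepeat [' '] (((s.2.1.length : Int) - (s.1.length : Int))),
     ct.2 ++ s.2.1)

def lineAuxG : List (List Char) → (List Char × List Char) → (List Char × List Char × Nat) →
    (List Char × List Char) × (List Char × List Char × Nat)
  | [], ct, s => (ct, s)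
  | [seg], ct, s => (ct, applyParts (charSplit seg '}') s)
  | seg :: r :: t, ct, s =>
      lineAuxG (r :: t) (emit ct (applyParts (charSplit seg '}') s)) ([], [], 0)

def fmtG (rc : Bool) (p : (List Char × List Char) × (List Char × List Char × Nat)) : List Char :=
  let ct := emit p.1 p.2
  if rc then ct.1 ++ ['\n'] ++ ct.2 ++ ['\n'] else ct.2 ++ [' ']

def G (rc : Bool) : List (List Char) → (List Char × List Char) →
    (List Char × List Char × Nat) → List Char
  | [], _, _ => []
  | l :: rest, ct, s => fmtG rc (lineAuxG (charSplit l '{') ct s) ++ G rc rest ([], []) ([], [], 0)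

theorem appendAt_nil (s : List Char × List Char × Nat) : appendAt [] s = s := by
  obtain ⟨p0, p1, st⟩ := s
  simp [appendAt]

theorem appendAt_cons (x : Char) (h : List Char) (s : List Char × List Char × Nat) :
    appendAt (x :: h) s = appendAt h (appendAt [x] s) := by
  obtain ⟨p0, p1, st⟩ := s
  match st with
  | 0 => simp [appendAt]
  | 1 => simp [appendAt]
  | n + 2 => simp [appendAt]

theorem applyParts_stuck (l : List (List Char)) (p0 p1 : List Char) :
    applyParts l (p0, p1, 2) = (p0, p1, 2) := by
  induction l with
  | nil => rfl
  | cons a t ih =>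
    cases t with
    | nil => simp [applyParts, appendAt]
    | cons b t' =>
      show applyParts (b :: t') (bump (appendAt a (p0, p1, 2))) = (p0, p1, 2)
      have h1 : appendAt a (p0, p1, 2) = (p0, p1, 2) := by simp [appendAt]
      have h2 : bump (p0, p1, 2) = (p0, p1, 2) := by simp [bump]
      rw [h1, h2]
      exact ih

theorem charSplit_cons_ne (x c : Char) (hx : x ≠ c) (xs : List Char) (h : List Char)
    (t : List (List Char)) (hs : charSplit xs c = h :: t) :
    charSplit (x :: xs) c = (x :: h) :: t := by
  simp [charSplit, hx, hs]

theorem segCons (x : Char) (seg : List Char) (s : List Char × List Char × Nat) :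
    applyParts (charSplit (x :: seg) '}') s = applyParts (charSplit seg '}') (charStep x s) := by
  obtain ⟨h, t, hs⟩ : ∃ h t, charSplit seg '}' = h :: t := by
    rcases hq : charSplit seg '}' with _ | ⟨h, t⟩
    · exact absurd hq (charSplit_ne_nil seg '}')
    · exact ⟨h, t, rfl⟩
  by_cases hx : x = '}'
  · subst hx
    have : charSplit ('}' :: seg) '}' = [] :: h :: t := by simp [charSplit, hs]
    rw [this, hs]
    cases t with
    | nil => simp [applyParts, appendAt_nil, charStep]
    | cons b t' =>
      show applyParts (h :: b :: t') (bump (appendAt [] s)) = _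
      rw [appendAt_nil]
      rfl
  · rw [charSplit_cons_ne x '}' hx seg h t hs, hs]
    cases t with
    | nil =>
      show appendAt (x :: h) s = applyParts [h] (charStep x s)
      rw [appendAt_cons]
      simp only [charStep, if_neg hx]
      rfl
    | cons b t' =>
      show applyParts (b :: t') (bump (appendAt (x :: h) s)) = _
      rw [appendAt_cons]
      simp only [charStep, if_neg hx]
      rfl

theorem lineCons (x : Char) (l : List Char) (ct : List Char × List Char)
    (s : List Char × List Char × Nat) :
    lineAuxG (charSplit (x :: l) '{') ct s =
      if x = '{' then lineAuxG (charSplit l '{') (emit ct s) ([], [], 0)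
      else lineAuxG (charSplit l '{') ct (charStep x s) := by
  obtain ⟨h, t, hs⟩ : ∃ h t, charSplit l '{' = h :: t := by
    rcases hq : charSplit l '{' with _ | ⟨h, t⟩
    · exact absurd hq (charSplit_ne_nil l '{')
    · exact ⟨h, t, rfl⟩
  by_cases hx : x = '{'
  · subst hx
    have hcs : charSplit ('{' :: l) '{' = [] :: h :: t := by simp [charSplit, hs]
    rw [hcs, hs, if_pos rfl]
    show lineAuxG (h :: t) (emit ct (applyParts (charSplit [] '}') s)) ([], [], 0) = _
    have : applyParts (charSplit [] '}') s = s := by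
      show applyParts [[]] s = s
      show appendAt [] s = s
      exact appendAt_nil s
    rw [this]
  · rw [charSplit_cons_ne x '{' hx l h t hs, hs, if_neg hx]
    cases t with
    | nil =>
      show (ct, applyParts (charSplit (x :: h) '}') s) = _
      rw [segCons]
      rfl
    | cons b t' =>
      show lineAuxG (b :: t') (emit ct (applyParts (charSplit (x :: h) '}') s)) ([], [], 0) = _
      rw [segCons]
      rfl

theorem bFlushSeg_eq (out ch tx p0 p1 : List Char) (st : Nat) :
    bFlushSeg ⟨out, ch, tx, p0, p1, st⟩ =
      ⟨out, (emit (ch, tx) (p0, p1, st)).1, (emit (ch, tx) (p0, p1, st)).2, [], [], 0⟩ := by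
  by_cases h : st = 0 <;> simp [bFlushSeg, emit, h]

theorem bFlushLine_eq (rc : Bool) (out ch tx p0 p1 : List Char) (st : Nat) :
    bFlushLine rc ⟨out, ch, tx, p0, p1, st⟩ =
      ⟨out ++ fmtG rc ((ch, tx), (p0, p1, st)), [], [], [], [], 0⟩ := by
  rw [bFlushLine, bFlushSeg_eq]
  cases rc <;> simp [fmtG]

theorem lineAuxG_nil_seg (ct : List Char × List Char) (s : List Char × List Char × Nat) :
    lineAuxG [[]] ct s = (ct, s) := by
  show (ct, applyParts (charSplit [] '}') s) = (ct, s)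
  show (ct, appendAt [] s) = (ct, s)
  rw [appendAt_nil]

theorem G_cons_ne (rc : Bool) (x : Char) (hx : x ≠ '%') (cs : List Char)
    (ct : List Char × List Char) (s : List Char × List Char × Nat) :
    G rc (charSplit (x :: cs) '%') ct s =
      if x = '{' then G rc (charSplit cs '%') (emit ct s) ([], [], 0)
      else G rc (charSplit cs '%') ct (charStep x s) := by
  obtain ⟨h, t, hs⟩ : ∃ h t, charSplit cs '%' = h :: t := by
    rcases hq : charSplit cs '%' with _ | ⟨h, t⟩
    · exact absurd hq (charSplit_ne_nil cs '%')
    · exact ⟨h, t, rfl⟩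
  rw [charSplit_cons_ne x '%' hx cs h t hs, hs]
  show fmtG rc (lineAuxG (charSplit (x :: h) '{') ct s) ++ G rc t ([], []) ([], [], 0) = _
  rw [lineCons]
  by_cases hx2 : x = '{' <;> simp only [hx2, if_pos, ite_false] <;> rfl

theorem bStep_other (rc : Bool) (x : Char) (hx : x ≠ '%') (hx2 : x ≠ '{')
    (out ch tx p0 p1 : List Char) (st : Nat) :
    bStep rc ⟨out, ch, tx, p0, p1, st⟩ x =
      ⟨out, ch, tx, (charStep x (p0, p1, st)).1, (charStep x (p0, p1, st)).2.1,
        (charStep x (p0, p1, st)).2.2⟩ := by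
  by_cases h3 : x = '}'
  · subst h3
    by_cases h : st < 2 <;> simp [bStep, hx, hx2, charStep, bump, h]
  · match st with
    | 0 => simp [bStep, hx, hx2, h3, charStep, appendAt]
    | 1 => simp [bStep, hx, hx2, h3, charStep, appendAt]
    | n + 2 => simp [bStep, hx, hx2, h3, charStep, appendAt]

theorem topRun (rc : Bool) (cs : List Char) : ∀ (out ch tx p0 p1 : List Char) (st : Nat),
    (bFlushLine rc (cs.foldl (bStep rc) ⟨out, ch, tx, p0, p1, st⟩)).out =
      out ++ G rc (charSplit cs '%') (ch, tx) (p0, p1, st) := by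
  induction cs with
  | nil =>
    intro out ch tx p0 p1 st
    show (bFlushLine rc ⟨out, ch, tx, p0, p1, st⟩).out = out ++ G rc [[]] (ch, tx) (p0, p1, st)
    rw [bFlushLine_eq]
    show out ++ fmtG rc ((ch, tx), (p0, p1, st)) =
      out ++ (fmtG rc (lineAuxG (charSplit [] '{') (ch, tx) (p0, p1, st)) ++
        G rc [] ([], []) ([], [], 0))
    rw [show charSplit [] '{' = [[]] from rfl, lineAuxG_nil_seg]
    simp [G]
  | cons x cs ih =>
    intro out ch tx p0 p1 st
    rw [List.foldl_cons]
    by_cases hx : x = '%'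
    · subst hx
      have hstep : bStep rc ⟨out, ch, tx, p0, p1, st⟩ '%' =
          (⟨out ++ fmtG rc ((ch, tx), (p0, p1, st)), [], [], [], [], 0⟩ : BSt) := by
        rw [show bStep rc ⟨out, ch, tx, p0, p1, st⟩ '%' = bFlushLine rc ⟨out, ch, tx, p0, p1, st⟩
              from rfl, bFlushLine_eq]
      rw [hstep, ih]
      obtain ⟨h, t, hs⟩ : ∃ h t, charSplit cs '%' = h :: t := by
        rcases hq : charSplit cs '%' with _ | ⟨h, t⟩
        · exact absurd hq (charSplit_ne_nil cs '%')
        · exact ⟨h, t, rfl⟩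
      rw [show charSplit ('%' :: cs) '%' = [] :: charSplit cs '%' from by simp [charSplit], hs]
      show _ = out ++ (fmtG rc (lineAuxG (charSplit [] '{') (ch, tx) (p0, p1, st)) ++
        G rc (h :: t) ([], []) ([], [], 0))
      rw [show charSplit [] '{' = [[]] from rfl, lineAuxG_nil_seg]
      simp [List.append_assoc]
    · by_cases hx2 : x = '{'
      · subst hx2
        rw [show bStep rc ⟨out, ch, tx, p0, p1, st⟩ '{' = bFlushSeg ⟨out, ch, tx, p0, p1, st⟩
              from rfl, bFlushSeg_eq, ih, G_cons_ne rc '{' hx cs, if_pos rfl]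
      · rw [bStep_other rc x hx hx2, ih, G_cons_ne rc x hx cs, if_neg hx2]

theorem A_seg (a : List Char) (t : List (List Char)) (ct : List Char × List Char) :
    (if (a :: t).length ≤ 1 then
       (ct.1 ++ PySem.List.pyRepeat [' '] (((PySem.List.pyGetD (a :: t) 0 []).length : Int)),
        ct.2 ++ PySem.List.pyGetD (a :: t) 0 [])
     else
       (ct.1 ++ PySem.List.pyGetD (a :: t) 0 [] ++
          PySem.List.pyRepeat [' ']
            (((PySem.List.pyGetD (a :: t) 1 []).length : Int) -
             ((PySem.List.pyGetD (a :: t) 0 []).length : Int)),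
        ct.2 ++ PySem.List.pyGetD (a :: t) 1 []))
    = emit ct (applyParts (a :: t) ([], [], 0)) := by
  cases t with
  | nil => simp [PySem.List.pyGetD, applyParts, appendAt, emit]
  | cons b t' =>
    cases t' with
    | nil => simp [PySem.List.pyGetD, applyParts, appendAt, bump, emit]
    | cons c t'' =>
      show _ = emit ct (applyParts (c :: t'') (bump (appendAt b (bump (appendAt a ([], [], 0))))))
      rw [show bump (appendAt b (bump (appendAt a (([], [], 0) : List Char × List Char × Nat))))
            = (a, b, 2) from by simp [appendAt, bump], applyParts_stuck]
      simp [PySem.List.pyGetD_ofNat', emit]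

theorem A_line (segs : List (List Char)) (h : segs ≠ []) : ∀ (ct : List Char × List Char),
    segs.foldl (fun ct seg =>
      if (charSplit seg '}').length ≤ 1 then
        (ct.1 ++ PySem.List.pyRepeat [' '] (((PySem.List.pyGetD (charSplit seg '}') 0 []).length : Int)),
         ct.2 ++ PySem.List.pyGetD (charSplit seg '}') 0 [])
      else
        (ct.1 ++ PySem.List.pyGetD (charSplit seg '}') 0 [] ++
           PySem.List.pyRepeat [' ']
             (((PySem.List.pyGetD (charSplit seg '}') 1 []).length : Int) -
              ((PySem.List.pyGetD (charSplit seg '}') 0 []).length : Int)),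
         ct.2 ++ PySem.List.pyGetD (charSplit seg '}') 1 [])) ct
    = emit (lineAuxG segs ct ([], [], 0)).1 (lineAuxG segs ct ([], [], 0)).2 := by
  induction segs with
  | nil => exact absurd rfl h
  | cons seg rest ih =>
    intro ct
    obtain ⟨a, t, hs⟩ : ∃ a t, charSplit seg '}' = a :: t := by
      rcases hq : charSplit seg '}' with _ | ⟨a, t⟩
      · exact absurd hq (charSplit_ne_nil seg '}')
      · exact ⟨a, t, rfl⟩
    rw [List.foldl_cons]
    cases rest with
    | nil =>
      show (if (charSplit seg '}').length ≤ 1 then _ else _) = _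
      rw [hs, A_seg]
      show emit ct (applyParts (a :: t) ([], [], 0)) =
        emit (ct, applyParts (charSplit seg '}') ([], [], 0)).1
          (ct, applyParts (charSplit seg '}') ([], [], 0)).2
      rw [hs]
    | cons r t2 =>
      rw [show lineAuxG (seg :: r :: t2) ct ([], [], 0) =
            lineAuxG (r :: t2) (emit ct (applyParts (charSplit seg '}') ([], [], 0))) ([], [], 0)
          from rfl]
      rw [← ih (by simp)]
      congr 1
      rw [hs, A_seg]

theorem A_outer (rc : Bool) (lines : List (List Char)) : ∀ (pref : List Char),
    lines.foldl (fun formatted line =>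
      let ct := (charSplit line '{').foldl (fun ct seg =>
        if (charSplit seg '}').length ≤ 1 then
          (ct.1 ++ PySem.List.pyRepeat [' '] (((PySem.List.pyGetD (charSplit seg '}') 0 []).length : Int)),
           ct.2 ++ PySem.List.pyGetD (charSplit seg '}') 0 [])
        else
          (ct.1 ++ PySem.List.pyGetD (charSplit seg '}') 0 [] ++
             PySem.List.pyRepeat [' ']
               (((PySem.List.pyGetD (charSplit seg '}') 1 []).length : Int) -
                ((PySem.List.pyGetD (charSplit seg '}') 0 []).length : Int)),
           ct.2 ++ PySem.List.pyGetD (charSplit seg '}') 1 [])) ([], [])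
      if rc then formatted ++ ct.1 ++ ['\n'] ++ ct.2 ++ ['\n']
      else formatted ++ ct.2 ++ [' ']) pref
    = pref ++ G rc lines ([], []) ([], [], 0) := by
  induction lines with
  | nil => intro pref; simp [G]
  | cons l rest ih =>
    intro pref
    have hl := A_line (charSplit l '{') (charSplit_ne_nil l '{') ([], [])
    simp only [List.foldl_cons, ih, hl]
    rw [show G rc (l :: rest) ([], []) ([], [], 0) =
          fmtG rc (lineAuxG (charSplit l '{') ([], []) ([], [], 0)) ++
            G rc rest ([], []) ([], [], 0) from rfl]
    cases rc <;> simp [fmtG, List.append_assoc]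

-- ===== VERDICT (by name: the statement is the Claim_ definition above) =====
theorem render_verse_spec : Claim_equal_render_verse := by
  intro txt rc _
  show render_verse txt rc = render_verse_alt txt rc
  rw [render_verse, render_verse_alt]
  rw [topRun]
  simp only [PySem.List.foldl_append_singleton_eq_map, List.nil_append,
    splitOn_eq_charSplit, List.foldl_map]
  rw [A_outer]
  rfl
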